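-- pv_equiv track=rewrite | github.com/exile79/hackerrank-solutions | mathematics/fundamentals/bus_station.py | solve
-- ===== SOURCE A (Python) =====
-- import itertools
--
-- def solve(friendGroups):
--     solutions = []
--     totalFriends = sum(friendGroups)
--     seatedTotal = 0
--     minBusSeats = max(friendGroups)
--     busSeats = 0
--
--     # cumulative sum
--     cumSum = set(itertools.accumulate(friendGroups))
--
--     for i in cumSum:
--
--         if i < minBusSeats or totalFriends%i != 0:
--             continue
--
--         busSeats = i
--
--         seatedFriends = 0
--         seatedTotal = 0
--
--         for idx, n in enumerate(friendGroups):
--             seatedFriends += n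
--             if(seatedFriends > busSeats):
--                 break
--             if(seatedFriends == busSeats):
--                 seatedTotal += n
--                 seatedFriends = 0
--                 if(seatedTotal == totalFriends):
--                     solutions.append(busSeats)
--                     break
--                 continue
--             if(seatedTotal == totalFriends):
--                 solutions.append(busSeats)
--                 break
--             seatedTotal += n
--
--     solutions.sort()
--     return solutions
-- ===== SOURCE B (Python) =====
-- import itertools
--
-- def solve(friendGroups):
--     total = sum(friendGroups)
--     biggest = max(friendGroups)
--     prefixes = set(itertools.accumulate(friendGroups))
--     valid = [d for d in prefixes
--              if d >= biggest and total % d == 0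
--              and all(k * d in prefixes for k in range(1, total // d + 1))]
--     valid.sort()
--     return valid
-- ===== Notes on version B (the rewrite author's own statement) =====
-- stated objective: alternative
-- what changed: Each candidate block size d is validated by checking that every multiple k*d (k=1..total//d) lies in the prefix-sum set, replacing A's per-candidate greedy seat-filling re-scan of the group list with its break/continue state machine.
-- outside the precondition, e.g. on solve([-4, 5, 2, 3, -1]): A returns [], B returns [5]; on solve([3, 1, 3, -3, -4]): A returns [4, 7], B returns [3, 4, 7]
import Mathlib
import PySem

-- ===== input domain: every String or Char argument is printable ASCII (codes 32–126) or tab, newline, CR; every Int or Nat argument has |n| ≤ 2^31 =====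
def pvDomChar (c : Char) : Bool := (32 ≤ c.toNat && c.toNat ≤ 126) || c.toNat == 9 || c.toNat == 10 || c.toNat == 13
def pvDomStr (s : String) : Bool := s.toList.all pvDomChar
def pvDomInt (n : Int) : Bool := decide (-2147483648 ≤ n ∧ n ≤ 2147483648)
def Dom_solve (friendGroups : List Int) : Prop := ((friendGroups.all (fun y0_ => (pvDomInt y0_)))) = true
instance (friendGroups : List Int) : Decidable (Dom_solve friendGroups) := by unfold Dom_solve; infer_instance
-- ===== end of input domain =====

-- B validates a candidate block size by membership of all its multiples in the prefix-sum set,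
-- instead of A's greedy seat-filling re-scan of the group list (alternative algorithm, similar cost).


-- ===== PORT A =====
-- itertools.accumulate(l) starting from running total q (hand port, exact: running sums in order)
def presums (l : List Int) (q : Int) : List Int :=
  match l with
  | [] => []
  | n :: r => (q + n) :: presums r (q + n)

-- A's inner 'for idx, n in enumerate(friendGroups)' loop (idx unused); returns true iff it appends busSeats
def scanA (total bus : Int) : List Int → Int → Int → Bool
  | [], _, _ => false
  | n :: rest, seatedFriends, seatedTotal =>
    if bus < seatedFriends + n then false
    else if seatedFriends + n = bus then
      (if seatedTotal + n = total then true
       else scanA total bus rest 0 (seatedTotal + n))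
    else if seatedTotal = total then true
    else scanA total bus rest (seatedFriends + n) (seatedTotal + n)

def solve (friendGroups : List Int) : List Int :=
  let totalFriends := friendGroups.sum
  let minBusSeats := (PySem.List.max? friendGroups (fun x => x)).getD 0  -- Pre_ excludes [], where Python max raises
  let cumSum : PySem.Set Int := PySem.Set.ofList (presums friendGroups 0)
  let solutions := cumSum.foldl (fun sols i =>
      if i < minBusSeats then sols
      else if PySem.Int.mod totalFriends i ≠ 0 then sols
      else if scanA totalFriends i friendGroups 0 0 then sols ++ [i] else sols) []
  PySem.List.sorted solutions (fun x => x)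

-- ===== PORT B =====
def solve_alt (friendGroups : List Int) : List Int :=
  let total := friendGroups.sum
  let biggest := (PySem.List.max? friendGroups (fun x => x)).getD 0  -- Pre_ excludes [], where Python max raises
  let prefixes : PySem.Set Int := PySem.Set.ofList (presums friendGroups 0)
  let valid := prefixes.filter (fun d =>
      decide (biggest ≤ d) &&
      (PySem.Int.mod total d == 0) &&
      (PySem.List.pyRange 1 (PySem.Int.floordiv total d + 1) 1).all
        (fun k => PySem.Set.contains prefixes (k * d)))
  PySem.List.sorted valid (fun x => x)

-- ===== PRECONDITION & SPEC =====
-- Pre_ excludes [] (A raises ValueError in max) and lists with a zero prefix sum reaching the modulus (A raises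
-- ZeroDivisionError), and lists containing a negative group in which some prefix sum passes both guards: negative
-- group sizes are outside the problem's natural domain (sizes are counts) and there A's greedy scan and B's
-- multiples test are two equally accidental readings.  Admitted: every list of nonnegative groups with at least one
-- positive group, plus any list in which no prefix sum is a feasible block size (both programs then return []).
def Pre_solve (friendGroups : List Int) : Prop :=
  friendGroups ≠ [] ∧
  ((∀ g ∈ friendGroups, 0 ≤ g) ∧ (∃ g ∈ friendGroups, 1 ≤ g) ∨
   (∀ p ∈ presums friendGroups 0, p ≠ 0 ∧
      (p < (PySem.List.max? friendGroups (fun x => x)).getD 0 ∨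
       PySem.Int.mod friendGroups.sum p ≠ 0)))
instance (friendGroups : List Int) : Decidable (Pre_solve friendGroups) := by unfold Pre_solve; infer_instance
def pvWitness_solve : List Int := [2, 1, 1]
def Spec_solve (friendGroups : List Int) (out : List Int) : Prop := out = solve_alt friendGroups
instance (friendGroups : List Int) (out : List Int) : Decidable (Spec_solve friendGroups out) := by unfold Spec_solve; infer_instance

-- ===== CLAIM (what is proved, stated in full; the proofs are below) =====
def Claim_equal_solve : Prop := ∀ (friendGroups : List Int), Dom_solve friendGroups → Pre_solve friendGroups → Spec_solve friendGroups (solve friendGroups)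

-- ===== LEMMAS AND PROOFS =====

-- every running sum is at least the start, for nonnegative groups
lemma presums_lb {l : List Int} {q x : Int} (hg : ∀ g ∈ l, 0 ≤ g) (hx : x ∈ presums l q) : q ≤ x := by
  induction l generalizing q with
  | nil => simp [presums] at hx
  | cons n r ih =>
    simp only [presums, List.mem_cons] at hx
    have hn : 0 ≤ n := hg n (by simp)
    rcases hx with h | h
    · omega
    · have := ih (fun g hgm => hg g (by simp [hgm])) h; omega

lemma sum_ge_one {l : List Int} (h0 : ∀ g ∈ l, 0 ≤ g) (h1 : ∃ g ∈ l, 1 ≤ g) : 1 ≤ l.sum := by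
  induction l with
  | nil => simp at h1
  | cons n r ih =>
    have hr : 0 ≤ r.sum := List.sum_nonneg (fun g hg => h0 g (by simp [hg]))
    have hn : 0 ≤ n := h0 n (by simp)
    rcases h1 with ⟨g, hg, hg1⟩
    rcases List.mem_cons.mp hg with rfl | hgr
    · simp only [List.sum_cons]; omega
    · have := ih (fun g hg => h0 g (by simp [hg])) ⟨g, hgr, hg1⟩
      simp only [List.sum_cons]; omega

-- core: A's greedy scan succeeds iff every multiple of d beyond m (up to total) is a running sum
lemma scan_iff (total d : Int) (hd : 1 ≤ d) (hdvd : d ∣ total) :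
    ∀ (rest : List Int) (q m : Int), (∀ g ∈ rest, 0 ≤ g ∧ g ≤ d) →
    m ≤ q → q < m + d → d ∣ m → q + rest.sum = total → m < total →
    (scanA total d rest (q - m) q = true ↔
      ∀ j : Int, 1 ≤ j → m + j * d ≤ total → (m + j * d) ∈ presums rest q) := by
  intro rest
  induction rest with
  | nil =>
    intro q m hg hmq hqd hdm hsum hmt
    exfalso
    have hq : q = total := by simpa using hsum
    have hdv : d ∣ (total - m) := dvd_sub hdvd hdm
    rcases (by omega : total - m = 0 ∨ 1 ≤ total - m) with h | h
    · omega
    · have := Int.le_of_dvd (by omega) hdv; omega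
  | cons n rest ih =>
    intro q m hg hmq hqd hdm hsum hmt
    have hn := hg n (by simp)
    have hrest : ∀ g ∈ rest, 0 ≤ g ∧ g ≤ d := fun g hgm => hg g (by simp [hgm])
    have hrest0 : ∀ g ∈ rest, (0:Int) ≤ g := fun g hgm => (hrest g hgm).1
    have hsum' : (q + n) + rest.sum = total := by simp only [List.sum_cons] at hsum; omega
    have hrs : (0:Int) ≤ rest.sum := List.sum_nonneg hrest0
    have hjd : ∀ j : Int, 1 ≤ j → d ≤ j * d := fun j hj =>
      le_mul_of_one_le_left (by omega) hj
    simp only [scanA, presums]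
    split_ifs with hA hB hC hD
    · -- seatedFriends overflow: both sides false (witness j = 1)
      rw [false_iff]
      intro hR
      have h1 := hR 1 le_rfl (by omega)
      rcases List.mem_cons.mp h1 with h | h
      · omega
      · have := presums_lb hrest0 h; omega
    · -- block completes and everyone is seated: both sides true
      refine ⟨fun _ j hj hjt => ?_, fun _ => rfl⟩
      have hj1 : j = 1 := by
        have := hjd j hj
        have h2 : j * d ≤ 1 * d := by omega
        have := le_of_mul_le_mul_right h2 (by omega : (0:Int) < d)
        omega
      subst hj1
      exact List.mem_cons.mpr (Or.inl (by omega))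
    · -- block completes, recurse with a fresh block at m + d
      have hmd : m + d < total := by omega
      have hIH := ih (q + n) (m + d) hrest (by omega) (by omega)
        (Dvd.dvd.add hdm dvd_rfl) hsum' hmd
      have h0 : q + n - (m + d) = 0 := by omega
      rw [h0] at hIH
      rw [hIH]
      constructor
      · intro h j hj hjt
        rcases (by omega : j = 1 ∨ 2 ≤ j) with rfl | hj2
        · exact List.mem_cons.mpr (Or.inl (by omega))
        · have e : m + d + (j - 1) * d = m + j * d := by ring
          have hmem := h (j - 1) (by omega) (by omega)
          rw [e] at hmem
          exact List.mem_cons_of_mem _ hmem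
      · intro h j hj hjt
        have e : m + d + j * d = m + (j + 1) * d := by ring
        have e3 : (j + 1) * d = j * d + d := by ring
        have hmem := h (j + 1) (by omega) (by omega)
        rcases List.mem_cons.mp hmem with heq | hmem'
        · exfalso; have := hjd j hj; omega
        · rw [e]; exact hmem'
    · -- 'seatedTotal == totalFriends' mid-list: unreachable under d ∣ total
      exfalso
      have hdv : d ∣ (q - m) := by
        have : d ∣ (total - m) := dvd_sub hdvd hdm
        rwa [show total - m = q - m by omega] at this
      rcases (by omega : q - m = 0 ∨ 1 ≤ q - m) with h | h
      · omega
      · have := Int.le_of_dvd (by omega) hdv; omega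
    · -- block still open, keep filling it
      have hIH := ih (q + n) m hrest (by omega) (by omega) hdm hsum' hmt
      rw [show q - m + n = q + n - m by omega, hIH]
      constructor
      · intro h j hj hjt
        exact List.mem_cons_of_mem _ (h j hj hjt)
      · intro h j hj hjt
        rcases List.mem_cons.mp (h j hj hjt) with heq | hmem
        · exfalso; have := hjd j hj; omega
        · exact hmem

-- the top-level instance of the scan equivalence
lemma scan_top (fg : List Int) (total d : Int) (hd : 1 ≤ d) (hdvd : d ∣ total)
    (hg : ∀ g ∈ fg, 0 ≤ g ∧ g ≤ d) (htot : fg.sum = total) (hpos : 0 < total) :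
    (scanA total d fg 0 0 = true ↔
      ∀ j : Int, 1 ≤ j → j * d ≤ total → j * d ∈ presums fg 0) := by
  have h := scan_iff total d hd hdvd fg 0 0 hg le_rfl (by omega) (dvd_zero d) (by omega) hpos
  simpa using h

-- A's foldl accumulation is a filter
lemma foldlA_eq_filter (minB total : Int) (fg : List Int) :
    ∀ (l : List Int) (acc : List Int),
      l.foldl (fun sols i =>
        if i < minB then sols
        else if PySem.Int.mod total i ≠ 0 then sols
        else if scanA total i fg 0 0 then sols ++ [i] else sols) acc
      = acc ++ l.filter (fun i =>
          !decide (i < minB) && (PySem.Int.mod total i == 0) && scanA total i fg 0 0) := by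
  intro l
  induction l with
  | nil => simp
  | cons x t ih =>
    intro acc
    simp only [List.foldl_cons]
    rw [ih]
    simp only [List.filter_cons]
    by_cases h1 : x < minB
    · simp [h1]
    · by_cases h2 : PySem.Int.mod total x = 0
      · by_cases h3 : scanA total x fg 0 0
        · simp [h1, h2, h3]
        · simp [h1, h2, h3]
      · simp [h1, h2]

-- ===== VERDICT (by name: the statement is the Claim_ definition above) =====
theorem solve_spec : Claim_equal_solve := by
  intro fg _hdom hpre
  obtain ⟨hne, hcase⟩ := hpre
  obtain ⟨mx, hmx⟩ : ∃ mx, PySem.List.max? fg (fun x => x) = some mx := by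
    cases h : PySem.List.max? fg (fun x => x) with
    | none => exact absurd ((PySem.List.max?_eq_none_iff _ _).mp h) hne
    | some m => exact ⟨m, rfl⟩
  have hmxmax : ∀ y ∈ fg, y ≤ mx := by
    have := PySem.List.max?_isMax hmx; simpa using this
  show solve fg = solve_alt fg
  unfold solve solve_alt
  simp only [hmx, Option.getD_some]
  rw [foldlA_eq_filter mx fg.sum fg]
  simp only [List.nil_append]
  congr 1
  apply List.filter_congr
  intro x hx
  have hxmem : x ∈ presums fg 0 := (PySem.Set.mem_ofList _ _).mp hx
  by_cases hlt : x < mx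
  · simp [hlt, not_le.mpr hlt]
  · have hxm : mx ≤ x := not_lt.mp hlt
    rcases hcase with ⟨h0, hex⟩ | hnc
    · -- nonnegative groups, at least one positive
      have hmx1 : 1 ≤ mx := by
        obtain ⟨g, hg, hg1⟩ := hex; exact le_trans hg1 (hmxmax g hg)
      have htot : 1 ≤ fg.sum := sum_ge_one h0 hex
      by_cases hmod : PySem.Int.mod fg.sum x = 0
      · have hdvd : x ∣ fg.sum := (PySem.Int.mod_eq_zero_iff_dvd _ _).mp hmod
        have hx1 : (1:Int) ≤ x := le_trans hmx1 hxm
        have hiff := scan_top fg fg.sum x hx1 hdvd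
          (fun g hg => ⟨h0 g hg, le_trans (hmxmax g hg) hxm⟩) rfl (by omega)
        have hall : ((PySem.List.pyRange 1 (PySem.Int.floordiv fg.sum x + 1) 1).all
            (fun k => PySem.Set.contains (PySem.Set.ofList (presums fg 0)) (k * x))) = true
            ↔ ∀ j : Int, 1 ≤ j → j * x ≤ fg.sum → j * x ∈ presums fg 0 := by
          rw [List.all_eq_true]
          constructor
          · intro h j hj hjt
            have hjr : j ∈ PySem.List.pyRange 1 (PySem.Int.floordiv fg.sum x + 1) 1 := by
              rw [PySem.List.mem_pyRange_one]
              refine ⟨hj, ?_⟩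
              have := (PySem.Int.le_floordiv_iff_mul_le (by omega : (0:Int) < x)).mpr hjt
              omega
            have := h j hjr
            rwa [PySem.Set.contains_iff, PySem.Set.mem_ofList] at this
          · intro h j hjr
            rw [PySem.List.mem_pyRange_one] at hjr
            have hjt : j * x ≤ fg.sum :=
              (PySem.Int.le_floordiv_iff_mul_le (by omega : (0:Int) < x)).mp (by omega)
            rw [PySem.Set.contains_iff, PySem.Set.mem_ofList]
            exact h j hjr.1 hjt
        simp only [hlt, hxm, hmod, decide_true, decide_false,
          Bool.not_false, Bool.true_and, beq_self_eq_true]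
        exact Bool.coe_iff_coe.mp (hiff.trans hall.symm)
      · simp [hlt, hxm, beq_eq_false_iff_ne.mpr hmod]
    · -- no prefix sum is a feasible block size: both predicates are false
      have hmodne : PySem.Int.mod fg.sum x ≠ 0 :=
        ((hnc x hxmem).2).resolve_left (by simp only [hmx, Option.getD_some]; omega)
      simp [hlt, beq_eq_false_iff_ne.mpr hmodne]
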